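-- pv_equiv track=rewrite | github.com/andyyvo/CS111 | PS 9/ps9image/ps9image/ps9pr3.py | fold_diag
-- ===== SOURCE A (Python) =====
-- def create_uniform_image(height, width, pixel):
--     """ creates and returns a 2-D list of pixels with height rows and
--         width columns in which all of the pixels have the RGB values
--         given by pixel
--         inputs: height and width are non-negative integers
--                 pixel is a 1-D list of RBG values of the form [R,G,B],
--                      where each element is an integer between 0 and 255.
--     """
--     pixels = []
--
--     for r in range(height):
--         row = [pixel] * width
--         pixels += [row]
--
--     return pixels
--
-- def blank_image(height, width):
--     """ creates and returns a 2-D list of pixels with height rows and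
--         width columns in which all of the pixels are green.
--         inputs: height and width are non-negative integers
--     """
--     all_green = create_uniform_image(height, width, [0, 255, 0])
--     return all_green
--
-- def fold_diag(pixels):
--     """ creates and returns a new 2-D list of pixels for an image
--         in which the original image is “folded” along its diagonal.
--     """
--     height = len(pixels)
--     width = len(pixels[0])
--     newimage = blank_image(height, width)
--     for r in range(height):
--         for c in range(width):
--             if r > c:
--                 pixels[r][c] = [255, 255, 255]
--                 pixel1 = pixels[r][c]
--                 newimage[r][c] = pixel1
--             else:
--                 pixel2 = pixels[r][c]
--                 newimage[r][c] = pixel2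
--     return newimage
-- ===== SOURCE B (Python) =====
-- def fold_diag(pixels):
--     """ creates and returns a new 2-D list of pixels for an image
--         in which the original image is "folded" along its diagonal.
--     """
--     width = len(pixels[0])
--     white = [255, 255, 255]
--     return [[white] * min(r, width) + row[min(r, width):width]
--             for r, row in enumerate(pixels)]
-- ===== Notes on version B (the rewrite author's own statement) =====
-- stated objective: simpler
-- what changed: B has no per-cell loops at all: instead of allocating a blank image and overwriting every cell under an r>c branch, it builds each output row in one comprehension as a replicated white prefix of length min(r,width) concatenated with the slice row[min(r,width):width]; B also does not mutate the input (A whitens pixels in place), the claim is about the return value.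
import Mathlib
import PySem

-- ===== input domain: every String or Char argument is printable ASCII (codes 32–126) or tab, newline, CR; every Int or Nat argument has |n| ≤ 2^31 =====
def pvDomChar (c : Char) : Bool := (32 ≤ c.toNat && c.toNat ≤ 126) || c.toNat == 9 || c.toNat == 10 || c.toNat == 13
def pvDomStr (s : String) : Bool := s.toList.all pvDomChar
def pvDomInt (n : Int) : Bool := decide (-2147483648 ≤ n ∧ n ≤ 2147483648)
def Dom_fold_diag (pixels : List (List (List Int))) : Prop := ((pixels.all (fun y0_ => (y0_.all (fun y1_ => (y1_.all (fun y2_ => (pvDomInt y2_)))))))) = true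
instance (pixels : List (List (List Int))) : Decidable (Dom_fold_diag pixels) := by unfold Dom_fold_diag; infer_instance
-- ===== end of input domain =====

-- B replaces A's blank-image scaffold and full height×width branching scan by a per-row closed
-- form: white prefix of length min(r,width) ++ slice row[min(r,width):width]; the claim is about
-- the RETURN value only (Python A also whitens the lower triangle of `pixels` in place, B does not).

-- ===== PORT A =====
def create_uniform_image (height width : Nat) (pixel : List Int) : List (List (List Int)) :=
  (List.range height).foldl (fun pixels _ => pixels ++ [List.replicate width pixel]) []

def blank_image (height width : Nat) : List (List (List Int)) :=
  create_uniform_image height width [0, 255, 0]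

-- pixels[r][c] = v  /  pixels[r][c]  (every use is in range on inputs admitted by Pre_)
def pvSetCell (img : List (List (List Int))) (r c : Nat) (v : List Int) : List (List (List Int)) :=
  img.set r ((img.getD r []).set c v)
def pvGetCell (img : List (List (List Int))) (r c : Nat) : List Int :=
  (img.getD r []).getD c []

-- one iteration of A's inner loop body, on the state (pixels, newimage)
def fdStep (r : Nat) (st : List (List (List Int)) × List (List (List Int))) (c : Nat) :
    List (List (List Int)) × List (List (List Int)) :=
  if r > c then
    let px := pvSetCell st.1 r c [255, 255, 255]
    let pixel1 := pvGetCell px r c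
    (px, pvSetCell st.2 r c pixel1)
  else
    let pixel2 := pvGetCell st.1 r c
    (st.1, pvSetCell st.2 r c pixel2)

def fold_diag (pixels : List (List (List Int))) : List (List (List Int)) :=
  let height := pixels.length
  let width := (pixels.headD []).length   -- len(pixels[0]); Pre_ excludes the empty image
  let newimage := blank_image height width
  ((List.range height).foldl
    (fun st r => (List.range width).foldl (fdStep r) st) (pixels, newimage)).2

-- ===== PORT B =====
def fold_diag_alt (pixels : List (List (List Int))) : List (List (List Int)) :=
  let width := (pixels.headD []).length
  (PySem.List.enumerate pixels).map (fun p =>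
    List.replicate (min p.1 (width : Int)).toNat [255, 255, 255] ++
    PySem.List.slice p.2 (some (min p.1 (width : Int))) (some (width : Int)))

-- ===== PRECONDITION & SPEC =====
-- Pre_ excludes exactly the inputs on which the Python A raises IndexError: the empty image
-- (it reads pixels[0]) and ragged images in which some row is shorter than the first row.
def Pre_fold_diag (pixels : List (List (List Int))) : Prop :=
  pixels ≠ [] ∧ ∀ row ∈ pixels, (pixels.headD []).length ≤ row.length
instance (pixels : List (List (List Int))) : Decidable (Pre_fold_diag pixels) := by
  unfold Pre_fold_diag; infer_instance

def pvWitness_fold_diag : List (List (List Int)) :=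
  [[[1, 2, 3], [4, 5, 6]], [[7, 8, 9], [10, 11, 12]]]

def Spec_fold_diag (pixels : List (List (List Int))) (out : List (List (List Int))) : Prop := out = fold_diag_alt pixels
instance (pixels : List (List (List Int))) (out : List (List (List Int))) : Decidable (Spec_fold_diag pixels out) := by unfold Spec_fold_diag; infer_instance

-- ===== CLAIM (what is proved, stated in full; the proofs are below) =====
def Claim_equal_fold_diag : Prop := ∀ (pixels : List (List (List Int))), Dom_fold_diag pixels → Pre_fold_diag pixels → Spec_fold_diag pixels (fold_diag pixels)

-- ===== LEMMAS AND PROOFS =====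

def pvW : List Int := [255, 255, 255]
-- row r of the result image
def tRow (wdt r : Nat) (row : List (List Int)) : List (List Int) :=
  (List.range wdt).map (fun c => if r > c then pvW else row.getD c [])

theorem foldl_append_map {α β : Type} (l : List α) (init : List β) (f : α → β) :
    l.foldl (fun acc x => acc ++ [f x]) init = init ++ l.map f := by
  induction l generalizing init with
  | nil => simp
  | cons a t ih => simp [ih]

theorem blank_image_eq (h w : Nat) :
    blank_image h w = List.replicate h (List.replicate w [0, 255, 0]) := by
  show (List.range h).foldl _ [] = _
  rw [foldl_append_map]
  simp [List.map_const']

theorem setfold_length (k : Nat) (g : Nat → List Int) (row : List (List Int)) :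
    (((List.range k).foldl (fun acc c => acc.set c (g c)) row)).length = row.length := by
  induction k with
  | zero => simp
  | succ n ih => rw [List.range_succ]; simp [ih]

theorem setfold_getElem? (k : Nat) (g : Nat → List Int) (row : List (List Int)) (i : Nat) :
    ((List.range k).foldl (fun acc c => acc.set c (g c)) row)[i]? =
      if i < k ∧ i < row.length then some (g i) else row[i]? := by
  induction k with
  | zero => simp
  | succ n ih =>
    rw [List.range_succ, List.foldl_append]
    simp only [List.foldl_cons, List.foldl_nil]
    rw [List.getElem?_set, setfold_length]
    by_cases h : n = i
    · subst h
      by_cases hl : n < row.length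
      · simp [hl]
      · simp [hl]
    · rw [if_neg h, ih]
      split_ifs with h1 h2 h2 <;> first | rfl | omega

theorem getD_set_self' {α : Type} (l : List α) (r : Nat) (v d : α)
    (h : r < l.length) : (l.set r v).getD r d = v := by
  rw [List.getD_eq_getElem?_getD, List.getElem?_set_self h]; rfl

theorem mutfold_length (k : Nat) (row : List (List Int)) :
    ((List.range k).foldl (fun row c => row.set c pvW) row).length = row.length :=
  setfold_length k (fun _ => pvW) row

theorem mutfold_getElem? (k : Nat) (row : List (List Int)) (i : Nat) :
    ((List.range k).foldl (fun row c => row.set c pvW) row)[i]? =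
      if i < k ∧ i < row.length then some pvW else row[i]? :=
  setfold_getElem? k (fun _ => pvW) row i

-- A's inner loop over c at a fixed row r, characterised
theorem inner_eq (r : Nat) (wdt : Nat) (px ni : List (List (List Int)))
    (hr : r < px.length) (hr' : r < ni.length)
    (hw : wdt ≤ (px.getD r []).length) (hw' : wdt ≤ (ni.getD r []).length) :
    (List.range wdt).foldl (fdStep r) (px, ni) =
      (px.set r ((List.range (min wdt r)).foldl (fun row c => row.set c pvW) (px.getD r [])),
       ni.set r ((List.range wdt).foldl
          (fun acc c => acc.set c (if r > c then pvW else (px.getD r []).getD c []))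
          (ni.getD r []))) := by
  induction wdt with
  | zero => simp [hr, hr']
  | succ n ih =>
    have hwn : n ≤ (px.getD r []).length := by omega
    have hwn' : n ≤ (ni.getD r []).length := by omega
    rw [List.range_succ, List.foldl_append, ih hwn hwn']
    simp only [List.foldl_cons, List.foldl_nil]
    have hlenM : ((List.range (min n r)).foldl (fun row c => row.set c pvW) (px.getD r [])).length
        = (px.getD r []).length := mutfold_length (min n r) _
    by_cases hrn : r > n
    · have hminn : min n r = n := by omega
      have hmin : min (n + 1) r = n + 1 := by omega
      simp only [fdStep, if_pos hrn, pvSetCell, pvGetCell, Prod.mk.injEq]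
      rw [getD_set_self' _ _ _ _ hr, List.set_set, getD_set_self' _ _ _ _ hr,
          getD_set_self' _ _ _ _ hr', List.set_set]
      have hpix : (((List.range (min n r)).foldl (fun row c => row.set c pvW)
            (px.getD r [])).set n ([255, 255, 255] : List Int)).getD n ([] : List Int)
            = [255, 255, 255] := by
        rw [List.getD_eq_getElem?_getD, List.getElem?_set_self (by omega)]; rfl
      rw [hpix]
      refine ⟨?_, ?_⟩
      · rw [hminn, hmin, List.range_succ, List.foldl_append]
        simp [pvW]
      · congr 1
        rw [List.foldl_append]
        simp [hrn, pvW]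
    · have hmin : min (n + 1) r = min n r := by omega
      simp only [fdStep, if_neg hrn, pvSetCell, pvGetCell, Prod.mk.injEq]
      rw [getD_set_self' _ _ _ _ hr', List.set_set, hmin]
      have hpix : ((px.set r ((List.range (min n r)).foldl (fun row c => row.set c pvW)
            (px.getD r []))).getD r []).getD n ([] : List Int) = (px.getD r []).getD n [] := by
        rw [getD_set_self' _ _ _ _ hr, List.getD_eq_getElem?_getD, mutfold_getElem?,
            if_neg (by omega), ← List.getD_eq_getElem?_getD]
      rw [hpix]
      refine ⟨rfl, ?_⟩
      congr 1
      rw [List.foldl_append]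
      simp [hrn]

theorem map_range_getD' {α : Type} (l : List α) (d : α) :
    (List.range l.length).map (fun i => l.getD i d) = l := by
  apply List.ext_getElem
  · simp
  · intro i h1 h2
    simp [List.getD_eq_getElem?_getD, List.getElem?_eq_getElem h2]

theorem getD_map_range'' {α : Type} (n i : Nat) (f : Nat → α) (d : α) (h : i < n) :
    ((List.range n).map f).getD i d = f i := by
  rw [List.getD_eq_getElem?_getD, List.getElem?_map, List.getElem?_range h]
  rfl

theorem set_map_range {α : Type} (n m : Nat) (f : Nat → α) (v : α) :
    ((List.range n).map f).set m v = (List.range n).map (fun i => if i = m then v else f i) := by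
  apply List.ext_getElem
  · simp
  · intro i h1 h2
    simp only [List.length_set, List.length_map, List.length_range] at h1
    rw [List.getElem_set, List.getElem_map, List.getElem_range]
    by_cases h : m = i
    · subst h; simp
    · rw [if_neg h, List.getElem_map, List.getElem_range, if_neg (fun hh => h hh.symm)]

theorem outRow_eq (wdt r : Nat) (row : List (List Int)) :
    (List.range wdt).foldl (fun acc c => acc.set c (if r > c then pvW else row.getD c []))
        (List.replicate wdt ([0, 255, 0] : List Int)) = tRow wdt r row := by
  apply List.ext_getElem?
  intro i
  rw [setfold_getElem? wdt (fun c => if r > c then pvW else row.getD c []) _ i,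
    List.length_replicate]
  by_cases hi : i < wdt
  · rw [if_pos ⟨hi, hi⟩]
    show _ = ((List.range wdt).map _)[i]?
    rw [List.getElem?_map, List.getElem?_range hi]
    rfl
  · rw [if_neg (by omega), List.getElem?_eq_none (by simp; omega),
      List.getElem?_eq_none (by simp [tRow]; omega)]

def mutRow (wdt r : Nat) (row : List (List Int)) : List (List Int) :=
  (List.range (min r wdt)).foldl (fun row c => row.set c pvW) row

theorem outer_eq (pixels : List (List (List Int))) (wdt : Nat)
    (hw : ∀ row ∈ pixels, wdt ≤ row.length) :
    ∀ m, m ≤ pixels.length →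
    (List.range m).foldl (fun st r => (List.range wdt).foldl (fdStep r) st)
        (pixels, List.replicate pixels.length (List.replicate wdt [0, 255, 0])) =
      ((List.range pixels.length).map
          (fun r => if r < m then mutRow wdt r (pixels.getD r []) else pixels.getD r []),
       (List.range pixels.length).map
          (fun r => if r < m then tRow wdt r (pixels.getD r []) else List.replicate wdt [0, 255, 0]))
  | 0, _ => by
    simp only [List.range_zero, List.foldl_nil, Nat.not_lt_zero, if_false, Prod.mk.injEq]
    exact ⟨(map_range_getD' pixels []).symm, by simp [List.map_const']⟩
  | (m + 1), hm => by
    have hmlt : m < pixels.length := by omega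
    have hrowmem : pixels.getD m [] ∈ pixels := by
      rw [List.getD_eq_getElem?_getD, List.getElem?_eq_getElem hmlt]
      exact List.getElem_mem _
    rw [List.range_succ, List.foldl_append, outer_eq pixels wdt hw m (by omega)]
    simp only [List.foldl_cons, List.foldl_nil]
    have hpx : ((List.range pixels.length).map
        (fun r => if r < m then mutRow wdt r (pixels.getD r []) else pixels.getD r [])).getD m []
        = pixels.getD m [] := by
      rw [getD_map_range'' _ _ _ _ hmlt, if_neg (Nat.lt_irrefl m)]
    have hni : ((List.range pixels.length).map
        (fun r => if r < m then tRow wdt r (pixels.getD r []) else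
          List.replicate wdt [0, 255, 0])).getD m []
        = List.replicate wdt ([0, 255, 0] : List Int) := by
      rw [getD_map_range'' _ _ _ _ hmlt, if_neg (Nat.lt_irrefl m)]
    rw [inner_eq m wdt _ _ (by simp [hmlt]) (by simp [hmlt])
        (by rw [hpx]; exact hw _ hrowmem) (by rw [hni]; simp)]
    rw [hpx, hni, outRow_eq, set_map_range, set_map_range, Prod.mk.injEq]
    constructor
    · apply List.map_congr_left
      intro i hi
      simp only [List.mem_range] at hi
      rcases Nat.lt_trichotomy i m with h | h | h
      · simp [h, Nat.ne_of_lt h, Nat.lt_succ_of_lt h]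
      · subst h; simp [mutRow, Nat.min_comm]
      · simp [show i ≠ m by omega, show ¬ i < m by omega, show ¬ i ≤ m by omega]
    · apply List.map_congr_left
      intro i hi
      simp only [List.mem_range] at hi
      rcases Nat.lt_trichotomy i m with h | h | h
      · simp [h, Nat.ne_of_lt h, Nat.lt_succ_of_lt h]
      · subst h; simp
      · simp [show i ≠ m by omega, show ¬ i < m by omega, show ¬ i ≤ m by omega]

theorem fold_diag_eq (pixels : List (List (List Int))) (hpre : Pre_fold_diag pixels) :
    fold_diag pixels =
      (List.range pixels.length).map
        (fun r => tRow (pixels.headD []).length r (pixels.getD r [])) := by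
  simp only [fold_diag]
  rw [blank_image_eq, outer_eq pixels _ hpre.2 pixels.length le_rfl]
  apply List.map_congr_left
  intro i hi
  simp only [List.mem_range] at hi
  simp [hi]

-- B's row formula equals the target row, for w ≤ len(row)
theorem b_row_eq (w r : Nat) (row : List (List Int)) (hw : w ≤ row.length) :
    List.replicate (min r w) pvW ++ (row.drop (min r w)).take (w - min r w) = tRow w r row := by
  apply List.ext_getElem?
  intro i
  set k := min r w with hk
  by_cases h1 : i < k
  · rw [List.getElem?_append_left (by simp [h1]), List.getElem?_replicate, if_pos h1]
    have : i < w := by omega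
    show _ = ((List.range w).map _)[i]?
    rw [List.getElem?_map, List.getElem?_range this]
    simp [show r > i by omega]
  · rw [List.getElem?_append_right (by simp; omega), List.length_replicate, List.getElem?_take,
      List.getElem?_drop]
    by_cases h2 : i < w
    · rw [if_pos (by omega)]
      have : k + (i - k) = i := by omega
      rw [this]
      show _ = ((List.range w).map _)[i]?
      rw [List.getElem?_map, List.getElem?_range h2]
      have hri : ¬ r > i := by omega
      simp [hri, List.getD_eq_getElem?_getD, List.getElem?_eq_getElem (show i < row.length by omega)]
    · rw [if_neg (by omega), List.getElem?_eq_none (by simp [tRow]; omega)]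

theorem alt_eq (pixels : List (List (List Int))) (hpre : Pre_fold_diag pixels) :
    fold_diag_alt pixels =
      (List.range pixels.length).map
        (fun r => tRow (pixels.headD []).length r (pixels.getD r [])) := by
  unfold fold_diag_alt
  apply List.ext_getElem?
  intro i
  set w := (pixels.headD []).length with hwdef
  rw [List.getElem?_map, PySem.List.getElem?_enumerate, List.getElem?_map]
  by_cases hi : i < pixels.length
  · rw [List.getElem?_eq_getElem hi, List.getElem?_range hi]
    simp only [Option.map_some]
    congr 1
    have hmin : min ((0 : Int) + (i : Int)) (w : Int) = ((min i w : Nat) : Int) := by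
      simp
    rw [hmin]
    have ht : (((min i w : Nat) : Int)).toNat = min i w := by omega
    rw [ht, PySem.List.slice_natCast]
    have hrow : pixels[i] = pixels.getD i [] := by
      rw [List.getD_eq_getElem?_getD, List.getElem?_eq_getElem hi]; rfl
    have hmem : pixels.getD i [] ∈ pixels := by
      rw [List.getD_eq_getElem?_getD, List.getElem?_eq_getElem hi]
      exact List.getElem_mem _
    rw [hrow]
    exact b_row_eq w i (pixels.getD i []) (hpre.2 _ hmem)
  · rw [List.getElem?_eq_none (by omega), List.getElem?_eq_none (by simp; omega)]
    rfl

-- ===== VERDICT (by name: the statement is the Claim_ definition above) =====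
theorem fold_diag_spec : Claim_equal_fold_diag := by
  intro pixels _ hpre
  unfold Spec_fold_diag
  rw [fold_diag_eq pixels hpre, alt_eq pixels hpre]
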